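-- pv_equiv track=rewrite | github.com/keyuxi/nnn_analysis | nnn/util.py | dotbracket2edgelist
-- ===== SOURCE A (Python) =====
-- def dotbracket2edgelist(dotbracket_str:str):
--
--     assert dotbracket_str.count('(') == dotbracket_str.count(')'), \
--         'Number of "(" and ")" should match in %s' % dotbracket_str
--
--     # Backbone edges
--     N = len(dotbracket_str)
--     edge_list = [[i, i+1] for i in range(N-1)]
--
--     # Hydrogen bonds
--     flag3p = N - 1
--     for i,x in enumerate(dotbracket_str):
--         if x == '(':
--             for j in range(flag3p, i, -1):
--                 if dotbracket_str[j] == ')':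
--                     edge_list.append([i, j])
--                     flag3p = j - 1
--                     break
--
--     return edge_list
-- ===== SOURCE B (Python) =====
-- def dotbracket2edgelist(dotbracket_str: str):
--
--     assert dotbracket_str.count('(') == dotbracket_str.count(')'), \
--         'Number of "(" and ")" should match in %s' % dotbracket_str
--
--     N = len(dotbracket_str)
--     edge_list = [[i, i + 1] for i in range(N - 1)]
--
--     # One pass: collect ')' positions once; each '(' pairs with the current
--     # rightmost unused ')' (popped from the end), provided it lies to its right.
--     closes = [j for j, c in enumerate(dotbracket_str) if c == ')']
--     for i, x in enumerate(dotbracket_str):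
--         if x == '(':
--             if closes and closes[-1] > i:
--                 edge_list.append([i, closes.pop()])
--
--     return edge_list
-- ===== Notes on version B (the rewrite author's own statement) =====
-- stated objective: alternative
-- what changed: A rescans the string right-to-left for a ')' on every '(' (nested loops); B instead precomputes the list of ')' positions once and pairs each '(' with the current rightmost unused ')' popped from the end of that list, so the inner rescan disappears (worst-case quadratic rescans become one linear pass, though on benign inputs A's inner loop breaks immediately and costs are similar).
-- outside the precondition, e.g. on dotbracket2edgelist('('): A raises AssertionError, B raises AssertionError; on dotbracket2edgelist(')'): A raises AssertionError, B raises AssertionError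
import Mathlib
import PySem

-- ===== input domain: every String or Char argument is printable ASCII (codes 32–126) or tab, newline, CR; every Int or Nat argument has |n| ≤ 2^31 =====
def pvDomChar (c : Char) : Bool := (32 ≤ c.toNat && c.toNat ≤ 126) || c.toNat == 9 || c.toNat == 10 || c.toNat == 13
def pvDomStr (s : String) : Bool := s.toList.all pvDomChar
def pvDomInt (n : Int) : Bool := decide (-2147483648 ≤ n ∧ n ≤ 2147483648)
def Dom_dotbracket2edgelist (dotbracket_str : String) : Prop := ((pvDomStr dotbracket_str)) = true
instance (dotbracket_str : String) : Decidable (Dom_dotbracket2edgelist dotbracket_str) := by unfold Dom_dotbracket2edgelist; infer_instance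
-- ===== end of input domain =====

-- B replaces A's per-'(' right-to-left rescan by one precomputed list of ')' positions
-- consumed from its end (objective 'alternative': the inner rescan disappears).

-- ===== PORT A =====
-- inner loop 'for j in range(flag3p, i, -1): if s[j] == ")": … break'
def pvScanA (cs : List Char) : List Int → Option Int
  | [] => none
  | j :: js => if PySem.List.pyGetD cs j ' ' = ')' then some j else pvScanA cs js

-- body of 'for i, x in enumerate(dotbracket_str)'; state = (edge_list, flag3p)
def pvStepA (cs : List Char) (st : List (List Int) × Int) (p : Int × Char) :
    List (List Int) × Int :=
  if p.2 = '(' then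
    match pvScanA cs (PySem.List.pyRange st.2 p.1 (-1)) with
    | some j => (st.1 ++ [[p.1, j]], j - 1)
    | none => st
  else st

def dotbracket2edgelist (dotbracket_str : String) : List (List Int) :=
  let cs := dotbracket_str.toList
  let N : Int := PySem.List.len cs
  let edge_list := (PySem.List.pyRange 0 (N - 1) 1).map (fun i => [i, i + 1])
  ((PySem.List.enumerate cs 0).foldl (pvStepA cs) (edge_list, N - 1)).1

-- ===== PORT B =====
-- 'closes = [j for j, c in enumerate(dotbracket_str) if c == ")"]'
def pvClosesB (cs : List Char) : List Int :=
  (PySem.List.enumerate cs 0).filterMap (fun p => if p.2 = ')' then some p.1 else none)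

-- 'for i, x in enumerate(s): if x == "(": if closes and closes[-1] > i: append([i, closes.pop()])'
def pvLoopB : List (Int × Char) → List (List Int) → List Int → List (List Int)
  | [], es, _ => es
  | p :: rest, es, closes =>
    if p.2 = '(' then
      match closes.getLast? with
      | some c =>
        if p.1 < c then pvLoopB rest (es ++ [[p.1, c]]) closes.dropLast
        else pvLoopB rest es closes
      | none => pvLoopB rest es closes
    else pvLoopB rest es closes

def dotbracket2edgelist_alt (dotbracket_str : String) : List (List Int) :=
  let cs := dotbracket_str.toList
  let N : Int := PySem.List.len cs
  let edge_list := (PySem.List.pyRange 0 (N - 1) 1).map (fun i => [i, i + 1])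
  pvLoopB (PySem.List.enumerate cs 0) edge_list (pvClosesB cs)

-- ===== PRECONDITION & SPEC =====
-- A's assert raises AssertionError exactly when the counts of '(' and ')' differ; those inputs are excluded (B asserts the same).
def Pre_dotbracket2edgelist (dotbracket_str : String) : Prop :=
  PySem.Str.count dotbracket_str "(" = PySem.Str.count dotbracket_str ")"
instance (dotbracket_str : String) : Decidable (Pre_dotbracket2edgelist dotbracket_str) := by
  unfold Pre_dotbracket2edgelist; infer_instance

def pvWitness_dotbracket2edgelist : String := "(.)"

def Spec_dotbracket2edgelist (dotbracket_str : String) (out : List (List Int)) : Prop :=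
  out = dotbracket2edgelist_alt dotbracket_str
instance (dotbracket_str : String) (out : List (List Int)) : Decidable (Spec_dotbracket2edgelist dotbracket_str out) := by
  unfold Spec_dotbracket2edgelist; infer_instance

-- ===== CLAIM (what is proved, stated in full; the proofs are below) =====
def Claim_equal_dotbracket2edgelist : Prop := ∀ (dotbracket_str : String), Dom_dotbracket2edgelist dotbracket_str → Pre_dotbracket2edgelist dotbracket_str → Spec_dotbracket2edgelist dotbracket_str (dotbracket2edgelist dotbracket_str)

-- ===== LEMMAS AND PROOFS =====

-- step-unfolding equations for the two loop bodies
lemma pvStepA_open (cs : List Char) (es : List (List Int)) (flag i : Int) :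
    pvStepA cs (es, flag) (i, '(') =
      (match pvScanA cs (PySem.List.pyRange flag i (-1)) with
        | some j => (es ++ [[i, j]], j - 1)
        | none => (es, flag)) := rfl

lemma pvStepA_skip (cs : List Char) (es : List (List Int)) (flag i : Int) {x : Char}
    (hx : x ≠ '(') : pvStepA cs (es, flag) (i, x) = (es, flag) := by
  simp [pvStepA, hx]

lemma pvLoopB_open (rest : List (Int × Char)) (es : List (List Int)) (closes : List Int)
    (i : Int) :
    pvLoopB ((i, '(') :: rest) es closes =
      (match closes.getLast? with
        | some c =>
          if i < c then pvLoopB rest (es ++ [[i, c]]) closes.dropLast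
          else pvLoopB rest es closes
        | none => pvLoopB rest es closes) := rfl

lemma pvLoopB_skip (rest : List (Int × Char)) (es : List (List Int)) (closes : List Int)
    (i : Int) {x : Char} (hx : x ≠ '(') :
    pvLoopB ((i, x) :: rest) es closes = pvLoopB rest es closes := by
  simp [pvLoopB, hx]

-- closes as a filter of the index range
lemma pvClosesB_eq (cs : List Char) :
    pvClosesB cs =
      (PySem.List.pyRange 0 (PySem.List.len cs) 1).filter
        (fun j => decide (PySem.List.pyGetD cs j ' ' = ')')) := by
  have he : PySem.List.enumerate cs 0 =
      (PySem.List.pyRange 0 (PySem.List.len cs) 1).map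
        (fun j => (j, PySem.List.pyGetD cs j ' ')) :=
    PySem.List.enumerate_eq_map_pyRange cs ' '
  rw [pvClosesB, he, List.filterMap_map]
  induction (PySem.List.pyRange 0 (PySem.List.len cs) 1) with
  | nil => rfl
  | cons a l ih =>
      simp only [Function.comp_def] at ih ⊢
      simp only [List.filterMap_cons, List.filter_cons]
      by_cases h : PySem.List.pyGetD cs a ' ' = ')' <;> simp [h, ih]

lemma pvClosesB_mem (cs : List Char) (j : Int) :
    j ∈ pvClosesB cs ↔ 0 ≤ j ∧ j < PySem.List.len cs ∧ PySem.List.pyGetD cs j ' ' = ')' := by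
  rw [pvClosesB_eq]
  simp [List.mem_filter, PySem.List.mem_pyRange_one, and_assoc]

lemma pvClosesB_sorted (cs : List Char) : (pvClosesB cs).Pairwise (· < ·) := by
  rw [pvClosesB_eq]
  exact (PySem.List.pairwise_lt_pyRange_one 0 (PySem.List.len cs)).filter _

-- in a strictly increasing list, the last element bounds every member
lemma pvLast_max {l : List Int} {c x : Int}
    (hs : l.Pairwise (· < ·)) (hg : l.getLast? = some c) (hx : x ∈ l) : x ≤ c := by
  induction l with
  | nil => cases hx
  | cons a t ih =>
      rcases List.pairwise_cons.mp hs with ⟨ha, ht⟩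
      cases t with
      | nil =>
          have h1 : a = c := by simpa using hg
          have h2 : x = a := by simpa using hx
          omega
      | cons b u =>
          rw [List.getLast?_cons_cons] at hg
          have hc : c ∈ b :: u := List.mem_of_getLast? hg
          rcases List.mem_cons.mp hx with rfl | hx
          · exact le_of_lt (ha c hc)
          · exact ih ht hg hx

-- scan characterisation: A's inner loop finds the largest ')' position ≤ hi, kept only if > i
lemma pvScanA_eq (cs : List Char) (i : Int) (h0 : 0 ≤ i) :
    ∀ (n : Nat) (hi : Int), (hi - i).toNat = n → hi < PySem.List.len cs →
      pvScanA cs (PySem.List.pyRange hi i (-1)) =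
        (match ((pvClosesB cs).filter (fun j => decide (j ≤ hi))).getLast? with
          | some c => if i < c then some c else none
          | none => none) := by
  intro n
  induction n with
  | zero =>
      intro hi hn hiN
      have hle : hi ≤ i := by omega
      rw [PySem.List.pyRange_neg_one_eq_nil hle]
      cases hg : ((pvClosesB cs).filter (fun j => decide (j ≤ hi))).getLast? with
      | none => rfl
      | some c =>
          have hc := List.mem_of_getLast? hg
          rw [List.mem_filter] at hc
          have hch : c ≤ hi := by simpa using hc.2
          show none = if i < c then some c else none
          rw [if_neg (by omega)]
  | succ n ih =>
      intro hi hn hiN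
      have hlt : i < hi := by omega
      rw [PySem.List.pyRange_neg_one_cons hlt]
      show (if PySem.List.pyGetD cs hi ' ' = ')' then some hi
            else pvScanA cs (PySem.List.pyRange (hi - 1) i (-1))) = _
      by_cases hch : PySem.List.pyGetD cs hi ' ' = ')'
      · rw [if_pos hch]
        have hmem : hi ∈ (pvClosesB cs).filter (fun j => decide (j ≤ hi)) := by
          rw [List.mem_filter]
          exact ⟨(pvClosesB_mem cs hi).mpr ⟨by omega, hiN, hch⟩, by simp⟩
        have hne : (pvClosesB cs).filter (fun j => decide (j ≤ hi)) ≠ [] :=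
          List.ne_nil_of_mem hmem
        cases hg : ((pvClosesB cs).filter (fun j => decide (j ≤ hi))).getLast? with
        | none => exact absurd (List.getLast?_eq_none_iff.mp hg) hne
        | some c =>
            have h1 : c ≤ hi := by
              have hc := List.mem_of_getLast? hg
              rw [List.mem_filter] at hc
              simpa using hc.2
            have h2 : hi ≤ c :=
              pvLast_max ((pvClosesB_sorted cs).filter _) hg hmem
            have hceq : c = hi := le_antisymm h1 h2
            subst hceq
            show some c = if i < c then some c else none
            rw [if_pos hlt]
      · rw [if_neg hch]
        have hfe : (pvClosesB cs).filter (fun j => decide (j ≤ hi)) =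
            (pvClosesB cs).filter (fun j => decide (j ≤ hi - 1)) := by
          apply List.filter_congr
          intro j hj
          have hjne : j ≠ hi := by
            intro h; subst h; exact hch ((pvClosesB_mem cs j).mp hj).2.2
          simp only [decide_eq_decide]
          omega
        rw [hfe]
        exact ih (hi - 1) (by omega) (by omega)

-- consuming the matched ')' = shrinking the filter bound
lemma pvFilter_drop (cs : List Char) (hi c : Int)
    (h : ((pvClosesB cs).filter (fun j => decide (j ≤ hi))).getLast? = some c) :
    (pvClosesB cs).filter (fun j => decide (j ≤ c - 1)) =
      ((pvClosesB cs).filter (fun j => decide (j ≤ hi))).dropLast := by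
  set F := (pvClosesB cs).filter (fun j => decide (j ≤ hi)) with hF
  have hcm := List.mem_of_getLast? h
  rw [hF, List.mem_filter] at hcm
  have hch : c ≤ hi := by simpa using hcm.2
  have hne : F ≠ [] := List.ne_nil_of_mem (by rw [hF]; exact List.mem_filter.mpr hcm)
  have hgl : F.getLast hne = c := by
    have h2 := List.getLast?_eq_some_getLast hne
    rw [h] at h2
    exact (Option.some_inj.mp h2).symm
  have hsplit : F.dropLast ++ [c] = F := by
    rw [← hgl]; exact List.dropLast_concat_getLast hne
  have hlt : ∀ x ∈ F.dropLast, x < c := by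
    intro x hx
    have hp : F.Pairwise (· < ·) := by rw [hF]; exact (pvClosesB_sorted cs).filter _
    rw [← hsplit] at hp
    exact (List.pairwise_append.mp hp).2.2 x hx c (by simp)
  have hc1 : List.filter (fun j => decide (j ≤ c - 1)) [c] = [] := by
    simp only [List.filter_cons, List.filter_nil, decide_eq_true_eq]
    rw [if_neg (by omega)]
  have step1 : (pvClosesB cs).filter (fun j => decide (j ≤ c - 1)) =
      F.filter (fun j => decide (j ≤ c - 1)) := by
    rw [hF, List.filter_filter]
    apply List.filter_congr
    intro j _
    by_cases h1 : j ≤ c - 1 <;> by_cases h2 : j ≤ hi <;> simp [h1, h2] <;> omega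
  rw [step1]
  conv_lhs => rw [← hsplit]
  rw [List.filter_append, hc1, List.append_nil]
  exact List.filter_eq_self.mpr (fun x hx => by have := hlt x hx; simp; omega)

-- the two loops agree: B's remaining list = the ')' positions still at or below flag3p
lemma pvMain (cs : List Char) (l : List (Int × Char)) (es : List (List Int)) (flag : Int)
    (hl : ∀ p ∈ l, 0 ≤ p.1) (hflag : flag < PySem.List.len cs) :
    (l.foldl (pvStepA cs) (es, flag)).1 =
      pvLoopB l es ((pvClosesB cs).filter (fun j => decide (j ≤ flag))) := by
  induction l generalizing es flag with
  | nil => rfl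
  | cons p rest ih =>
      rcases p with ⟨i, x⟩
      have h0 : 0 ≤ i := hl (i, x) List.mem_cons_self
      have hrest : ∀ q ∈ rest, 0 ≤ q.1 := fun q hq => hl q (List.mem_cons_of_mem _ hq)
      rw [List.foldl_cons]
      by_cases hx : x = '('
      · subst hx
        rw [pvStepA_open, pvLoopB_open,
          pvScanA_eq cs i h0 (flag - i).toNat flag rfl hflag]
        cases hg : ((pvClosesB cs).filter (fun j => decide (j ≤ flag))).getLast? with
        | none => exact ih es flag hrest hflag
        | some c =>
            have hcle : c ≤ flag := by
              have hc := List.mem_of_getLast? hg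
              rw [List.mem_filter] at hc
              simpa using hc.2
            show (List.foldl (pvStepA cs)
                  (match (if i < c then some c else none : Option Int) with
                    | some j => (es ++ [[i, j]], j - 1)
                    | none => (es, flag)) rest).1 =
                if i < c then
                  pvLoopB rest (es ++ [[i, c]])
                    ((List.filter (fun j => decide (j ≤ flag)) (pvClosesB cs)).dropLast)
                else pvLoopB rest es (List.filter (fun j => decide (j ≤ flag)) (pvClosesB cs))
            by_cases hic : i < c
            · simp only [if_pos hic]
              show (List.foldl (pvStepA cs) (es ++ [[i, c]], c - 1) rest).1 = _
              rw [← pvFilter_drop cs flag c hg]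
              exact ih (es ++ [[i, c]]) (c - 1) hrest (by omega)
            · simp only [if_neg hic]
              exact ih es flag hrest hflag
      · rw [pvStepA_skip cs es flag i hx, pvLoopB_skip rest es _ i hx]
        exact ih es flag hrest hflag

-- ===== VERDICT (by name: the statement is the Claim_ definition above) =====
theorem dotbracket2edgelist_spec : Claim_equal_dotbracket2edgelist := by
  intro s _ _
  unfold Spec_dotbracket2edgelist
  simp only [dotbracket2edgelist, dotbracket2edgelist_alt]
  have hl : ∀ p ∈ PySem.List.enumerate s.toList 0, 0 ≤ p.1 := by
    intro p hp
    rcases (PySem.List.mem_enumerate_iff s.toList 0 p).mp hp with ⟨k, hk, rfl⟩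
    simp
  have hflag : PySem.List.len s.toList - 1 < PySem.List.len s.toList := by
    rw [PySem.List.len_eq]; omega
  rw [pvMain s.toList (PySem.List.enumerate s.toList 0) _ (PySem.List.len s.toList - 1) hl hflag]
  congr 1
  apply List.filter_eq_self.mpr
  intro j hj
  have hm := (pvClosesB_mem s.toList j).mp hj
  rw [PySem.List.len_eq] at hm
  simp only [decide_eq_true_eq, PySem.List.len_eq]
  omega
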